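-- pv_equiv track=rewrite | github.com/AlexandreGirold/sarpenski-triangle | carpet.py | sarpenski_carpet
-- ===== SOURCE A (Python) =====
-- def sarpenski_carpet(n):
--     end=""
--     etoile="*"
--     espace=" "
--     if n == 0:
--         "n doit etre plus grand que 0"
--     pascal = [[1]]
--
--     for i in range(1, n):
--         line = [1]
--         for j in range(len(pascal)):
--             if j + 1 < len(pascal):
--                 line.append(pascal[i - 1][j] + pascal[i - 1][j + 1])
--         line.append(1)
--         pascal.append(line)
--     for l in pascal:
--         for e in l:
--             if e % 2 == 0 :
--                 end+=espace
--             else: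
--                 end+=etoile
--         end+="\n"
--
--     return end
-- ===== SOURCE B (Python) =====
-- def sarpenski_carpet(n):
--     rows = n if n > 1 else 1
--     lines = []
--     for i in range(rows):
--         row = [" "] * (i + 1)
--         s = i
--         while True:
--             row[s] = "*"
--             if s == 0:
--                 break
--             s = (s - 1) & i
--         lines.append("".join(row))
--     return "\n".join(lines) + "\n"
-- ===== Notes on version B (the rewrite author's own statement) =====
-- stated objective: faster
-- what changed: Instead of building the full bignum Pascal triangle and testing every entry's parity, B writes each row directly: by Lucas' theorem C(i,k) is odd iff k is a bit-submask of i, so it enumerates exactly the star cells of row i with the standard submask walk s -> (s-1) & i over a blank row.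
import Mathlib
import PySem

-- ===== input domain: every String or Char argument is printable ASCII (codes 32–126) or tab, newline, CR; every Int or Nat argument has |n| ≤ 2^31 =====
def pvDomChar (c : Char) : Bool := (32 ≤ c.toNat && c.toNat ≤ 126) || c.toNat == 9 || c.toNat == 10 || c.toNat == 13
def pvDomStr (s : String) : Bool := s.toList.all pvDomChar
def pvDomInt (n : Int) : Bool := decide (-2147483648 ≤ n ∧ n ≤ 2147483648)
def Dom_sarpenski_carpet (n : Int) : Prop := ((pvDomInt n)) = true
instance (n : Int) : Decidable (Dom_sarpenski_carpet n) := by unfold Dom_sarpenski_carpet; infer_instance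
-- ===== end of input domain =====

-- B replaces the bignum Pascal-triangle construction by a direct per-cell parity test
-- (Lucas: C(i,k) is odd iff k & (i-k) == 0); objective: faster.


-- ===== PORT A =====
-- one outer-loop iteration: build 'line' from the previous row and append it to 'pascal'
def pascalStep (pascal : List (List Int)) (i : Int) : List (List Int) :=
  pascal ++
    [((PySem.List.pyRange 0 (pascal.length : Int) 1).foldl
        (fun line j =>
          if j + 1 < (pascal.length : Int) then
            line ++ [PySem.List.pyGetD (PySem.List.pyGetD pascal (i - 1) []) j 0 +
                     PySem.List.pyGetD (PySem.List.pyGetD pascal (i - 1) []) (j + 1) 0]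
          else line)
        [(1 : Int)]) ++ [(1 : Int)]]

-- the result string is built as a List Char (Python's end += c) and packed at the end
def sarpenski_carpet (n : Int) : String :=
  String.ofList
    (((PySem.List.pyRange 1 n 1).foldl pascalStep [[(1 : Int)]]).foldl
      (fun acc l =>
        (l.foldl (fun acc e =>
            if PySem.Int.mod e 2 == 0 then acc ++ [' '] else acc ++ ['*']) acc) ++ ['\n'])
      [])

-- ===== PORT B =====
-- the submask walk: row[s] = '*', then s -> (s-1) & i until s = 0  (operands are ≥ 0, so Nat bitwise-and is exact)
def fillStars (i s : Nat) (row : List Char) : List Char :=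
  if s = 0 then row.set s '*'
  else fillStars i ((s - 1) &&& i) (row.set s '*')
termination_by s
decreasing_by
  have h : (s - 1) &&& i ≤ s - 1 := Nat.and_le_left
  omega

-- row i: [" "] * (i+1), stars written by the walk, "".join gives the row back
def altRow (i : Nat) : List Char := fillStars i i (List.replicate (i + 1) ' ')

def sarpenski_carpet_alt (n : Int) : String :=
  String.ofList
    (PySem.Chars.join ['\n'] ((List.range (if n > 1 then n.toNat else 1)).map altRow) ++ ['\n'])

-- ===== PRECONDITION & SPEC =====
def Spec_sarpenski_carpet (n : Int) (out : String) : Prop := out = sarpenski_carpet_alt n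
instance (n : Int) (out : String) : Decidable (Spec_sarpenski_carpet n out) := by unfold Spec_sarpenski_carpet; infer_instance

-- ===== CLAIM (what is proved, stated in full; the proofs are below) =====
def Claim_equal_sarpenski_carpet : Prop := ∀ (n : Int), Dom_sarpenski_carpet n → Spec_sarpenski_carpet n (sarpenski_carpet n)

-- ===== LEMMAS AND PROOFS =====

-- row i of Pascal's triangle, as the Python ints A stores
def chooseRow (i : Nat) : List Int :=
  (List.range (i + 1)).map (fun k => (Nat.choose i k : Int))

-- generic loop shapes
theorem foldl_push_ite {α β : Type} (l : List α) (P : α → Prop) [DecidablePred P]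
    (f : α → β) (acc : List β) :
    l.foldl (fun acc x => if P x then acc ++ [f x] else acc) acc
      = acc ++ (l.filter (fun x => decide (P x))).map f := by
  induction l generalizing acc with
  | nil => simp
  | cons x t ih =>
      by_cases h : P x
      · simp only [List.foldl_cons, if_pos h, List.filter_cons, decide_eq_true h, ih]
        simp [List.append_assoc]
      · simp only [List.foldl_cons, if_neg h, List.filter_cons, decide_eq_false h, ih]
        simp

theorem foldl_append_flatten {α : Type} (rows : List α) (g : α → List Char) (acc : List Char) :
    rows.foldl (fun acc l => acc ++ g l) acc = acc ++ (rows.map g).flatten := by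
  induction rows generalizing acc with
  | nil => simp
  | cons x t ih => simp [ih, List.append_assoc]

theorem inner_push (l : List Int) (acc : List Char) :
    l.foldl (fun acc e => if PySem.Int.mod e 2 == 0 then acc ++ [' '] else acc ++ ['*']) acc
      = acc ++ l.map (fun e => if PySem.Int.mod e 2 == 0 then ' ' else '*') := by
  induction l generalizing acc with
  | nil => simp
  | cons x t ih =>
      simp only [List.foldl_cons, List.map_cons]
      by_cases h : PySem.Int.mod x 2 == 0
      · rw [if_pos h, if_pos h, ih]; simp
      · rw [if_neg h, if_neg h, ih]; simp

-- nat bitwise-and is zero iff no position has both bits set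
theorem and_zero_iff (a b : Nat) :
    a &&& b = 0 ↔ ∀ i, ¬(a.testBit i = true ∧ b.testBit i = true) := by
  constructor
  · intro h i hi
    have := Nat.testBit_land a b i
    rw [h] at this
    simp [hi.1, hi.2] at this
  · intro h
    apply Nat.eq_of_testBit_eq
    intro i
    have := h i
    rw [Nat.testBit_land]
    rcases ha : a.testBit i <;> rcases hb : b.testBit i <;> simp_all

theorem and_split (a b : Nat) :
    a &&& b = 0 ↔ (a % 2 = 0 ∨ b % 2 = 0) ∧ (a / 2) &&& (b / 2) = 0 := by
  rw [and_zero_iff, and_zero_iff]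
  constructor
  · intro h
    constructor
    · have h0 := h 0
      simp only [Nat.testBit_zero, decide_eq_true_eq] at h0
      omega
    · intro i hi
      exact h (i + 1) ⟨by rw [Nat.testBit_add_one]; exact hi.1,
                       by rw [Nat.testBit_add_one]; exact hi.2⟩
  · rintro ⟨h0, hs⟩ i hi
    cases i with
    | zero =>
        simp only [Nat.testBit_zero, decide_eq_true_eq] at hi
        omega
    | succ j =>
        rw [Nat.testBit_add_one, Nat.testBit_add_one] at hi
        exact hs j hi

-- Lucas' theorem mod 2: C(i,k) is odd iff the subtraction i-k has no binary borrow
theorem choose_odd_iff : ∀ i : Nat, ∀ k : Nat, k ≤ i →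
    (Nat.choose i k % 2 = 1 ↔ (i - k) &&& k = 0) := by
  intro i
  induction i using Nat.strong_induction_on with
  | _ i ih =>
    intro k hk
    rcases Nat.eq_zero_or_pos i with hi0 | hipos
    · subst hi0
      interval_cases k
      simp
    · have hrec : Nat.choose i k % 2 = (Nat.choose (i % 2) (k % 2) * Nat.choose (i / 2) (k / 2)) % 2 :=
        Choose.choose_modEq_choose_mod_mul_choose_div_nat (p := 2)
      rcases Nat.mod_two_eq_zero_or_one i with hi | hi <;>
        rcases Nat.mod_two_eq_zero_or_one k with hkp | hkp
      · -- i even, k even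
        have h2 : k / 2 ≤ i / 2 := by omega
        have hsub : (i - k) / 2 = i / 2 - k / 2 := by omega
        have hm : (i - k) % 2 = 0 := by omega
        rw [and_split, hrec, hi, hkp]
        simp only [Nat.choose_self, one_mul]
        rw [ih (i / 2) (by omega) (k / 2) h2, ← hsub]
        constructor
        · intro h; exact ⟨Or.inl hm, h⟩
        · rintro ⟨-, h⟩; exact h
      · -- i even, k odd : C(i,k) even and the low bits collide
        rw [hrec, hi, hkp]
        constructor
        · intro h; simp at h
        · intro h
          rw [and_split] at h
          rcases h.1 with h1 | h1 <;> omega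
      · -- i odd, k even
        have h2 : k / 2 ≤ i / 2 := by omega
        have hsub : (i - k) / 2 = i / 2 - k / 2 := by omega
        rw [and_split, hrec, hi, hkp]
        simp only [Nat.choose_zero_right, one_mul]
        rw [ih (i / 2) (by omega) (k / 2) h2, ← hsub]
        constructor
        · intro h; exact ⟨Or.inr trivial, h⟩
        · rintro ⟨-, h⟩; exact h
      · -- i odd, k odd
        have h2 : k / 2 ≤ i / 2 := by omega
        have hsub : (i - k) / 2 = i / 2 - k / 2 := by omega
        have hm : (i - k) % 2 = 0 := by omega
        rw [and_split, hrec, hi, hkp]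
        simp only [Nat.choose_self, one_mul]
        rw [ih (i / 2) (by omega) (k / 2) h2, ← hsub]
        constructor
        · intro h; exact ⟨Or.inl hm, h⟩
        · rintro ⟨-, h⟩; exact h

-- binary decomposition of bitwise-and, and the two submask facts B's walk relies on
theorem and_rec (a b : Nat) : a &&& b = 2 * (a / 2 &&& b / 2) + (a % 2) * (b % 2) := by
  have he : a % 2 * (b % 2) ≤ 1 := by
    rcases Nat.mod_two_eq_zero_or_one a with h | h <;>
      rcases Nat.mod_two_eq_zero_or_one b with h' | h' <;> simp [h, h']
  apply Nat.eq_of_testBit_eq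
  intro t
  cases t with
  | zero =>
      rw [Nat.testBit_land, Nat.testBit_zero, Nat.testBit_zero, Nat.testBit_zero]
      rcases Nat.mod_two_eq_zero_or_one a with h | h <;>
        rcases Nat.mod_two_eq_zero_or_one b with h' | h' <;>
          rw [h, h'] <;> simp
  | succ t =>
      have hdiv : (2 * (a / 2 &&& b / 2) + a % 2 * (b % 2)) / 2 = a / 2 &&& b / 2 := by omega
      rw [Nat.testBit_land, Nat.testBit_add_one, Nat.testBit_add_one, Nat.testBit_add_one,
          hdiv, ← Nat.testBit_land]

-- predecessor step of the submask walk: no submask of i is skipped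
theorem le_pred_and : ∀ s : Nat, ∀ i t : Nat, s &&& i = s → t &&& i = t → t < s → t ≤ (s - 1) &&& i := by
  intro s
  induction s using Nat.strong_induction_on with
  | _ s ih =>
    intro i t hs ht hlt
    have hrs := and_rec s i
    have hrt := and_rec t i
    have bs : s / 2 &&& i / 2 ≤ s / 2 := Nat.and_le_left
    have bt : t / 2 &&& i / 2 ≤ t / 2 := Nat.and_le_left
    have ps : s % 2 * (i % 2) ≤ s % 2 := by
      rcases Nat.mod_two_eq_zero_or_one i with h | h <;> simp [h]
    have pt : t % 2 * (i % 2) ≤ t % 2 := by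
      rcases Nat.mod_two_eq_zero_or_one i with h | h <;> simp [h]
    have hs1 : s / 2 &&& i / 2 = s / 2 := by omega
    have ht1 : t / 2 &&& i / 2 = t / 2 := by omega
    have hrp := and_rec (s - 1) i
    rcases Nat.mod_two_eq_zero_or_one s with hs0 | hs0
    · -- s even (and s > 0): s-1 is odd and (s-1)/2 = s/2 - 1; recurse on s/2
      have h1 : (s - 1) % 2 = 1 := by omega
      have h2 : (s - 1) / 2 = s / 2 - 1 := by omega
      rw [h1, h2, one_mul] at hrp
      have hih : t / 2 ≤ (s / 2 - 1) &&& (i / 2) :=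
        ih (s / 2) (by omega) (i / 2) (t / 2) hs1 ht1 (by omega)
      have ht2 : t % 2 * (i % 2) = t % 2 := by omega
      rcases Nat.mod_two_eq_zero_or_one t with ht0 | ht0
      · omega
      · rw [ht0, one_mul] at ht2
        omega
    · -- s odd: s-1 even, (s-1)/2 = s/2, and s/2 is still a submask of i/2
      have h1 : (s - 1) % 2 = 0 := by omega
      have h2 : (s - 1) / 2 = s / 2 := by omega
      rw [h1, h2, zero_mul] at hrp
      omega

-- Lucas' bit form: for k ≤ i, C-parity's borrow condition (i-k) & k = 0 says k is a submask of i
theorem sub_iff : ∀ i : Nat, ∀ t : Nat, t ≤ i → (t &&& (i - t) = 0 ↔ t &&& i = t) := by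
  intro i
  induction i using Nat.strong_induction_on with
  | _ i ih =>
    intro t hti
    rcases Nat.eq_zero_or_pos i with h0 | hpos
    · subst h0
      interval_cases t
      simp
    · have hA := and_rec t (i - t)
      have hB := and_rec t i
      have bA : t / 2 &&& (i - t) / 2 ≤ t / 2 := Nat.and_le_left
      have bB : t / 2 &&& i / 2 ≤ t / 2 := Nat.and_le_left
      have hIH := ih (i / 2) (by omega) (t / 2) (by omega)
      rcases Nat.mod_two_eq_zero_or_one i with hi | hi <;>
        rcases Nat.mod_two_eq_zero_or_one t with ht | ht
      · -- i even, t even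
        have hm : (i - t) % 2 = 0 := by omega
        have hsub : (i - t) / 2 = i / 2 - t / 2 := by omega
        rw [ht, zero_mul] at hA hB
        rw [hsub] at hA
        constructor
        · intro h
          have := hIH.mp (by omega)
          omega
        · intro h
          have := hIH.mpr (by omega)
          omega
      · -- i even, t odd: both sides false
        have hm : (i - t) % 2 = 1 := by omega
        rw [ht, hm, one_mul] at hA
        rw [ht, hi, one_mul] at hB
        constructor <;> intro h <;> omega
      · -- i odd, t even
        have hm : (i - t) % 2 = 1 := by omega
        have hsub : (i - t) / 2 = i / 2 - t / 2 := by omega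
        rw [ht, zero_mul] at hA hB
        rw [hsub] at hA
        constructor
        · intro h
          have := hIH.mp (by omega)
          omega
        · intro h
          have := hIH.mpr (by omega)
          omega
      · -- i odd, t odd
        have hm : (i - t) % 2 = 0 := by omega
        have hsub : (i - t) / 2 = i / 2 - t / 2 := by omega
        rw [ht, hm, one_mul] at hA
        rw [ht, hi, one_mul] at hB
        rw [hsub] at hA
        constructor
        · intro h
          have := hIH.mp (by omega)
          omega
        · intro h
          have := hIH.mpr (by omega)
          omega

theorem fillStars_length (i : Nat) : ∀ s : Nat, ∀ row : List Char,
    (fillStars i s row).length = row.length := by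
  intro s
  induction s using Nat.strong_induction_on with
  | _ s ih =>
    intro row
    rw [fillStars]
    split
    · simp
    · rename_i hne
      have h : (s - 1) &&& i ≤ s - 1 := Nat.and_le_left
      rw [ih ((s - 1) &&& i) (by omega)]
      simp

theorem fillStars_get (i : Nat) : ∀ s : Nat, s &&& i = s → ∀ row : List Char, ∀ t : Nat,
    s < row.length →
    (fillStars i s row)[t]? = if t ≤ s ∧ t &&& i = t then some '*' else row[t]? := by
  intro s
  induction s using Nat.strong_induction_on with
  | _ s ih =>
    intro hs row t hlen
    rw [fillStars]
    split
    · rename_i h0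
      subst h0
      rw [List.getElem?_set]
      by_cases ht : t = 0
      · subst ht
        rw [if_pos rfl, if_pos hlen,
            if_pos (⟨le_refl 0, by simp [Nat.zero_and]⟩ : 0 ≤ 0 ∧ 0 &&& i = 0)]
      · rw [if_neg (show ¬(0 = t) from fun h => ht h.symm),
            if_neg (show ¬(t ≤ 0 ∧ t &&& i = t) from fun h => ht (Nat.le_zero.mp h.1))]
    · rename_i hne
      have hble : (s - 1) &&& i ≤ s - 1 := Nat.and_le_left
      have hsub' : ((s - 1) &&& i) &&& i = (s - 1) &&& i := by
        rw [Nat.land_assoc, Nat.and_self]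
      rw [ih ((s - 1) &&& i) (by omega) hsub' _ t (by rw [List.length_set]; omega),
          List.getElem?_set]
      by_cases hts : t = s
      · rw [if_neg (show ¬(t ≤ (s - 1) &&& i ∧ t &&& i = t) from fun h => by omega),
            if_pos hts.symm, if_pos hlen,
            if_pos (⟨by omega, by rw [hts]; exact hs⟩ : t ≤ s ∧ t &&& i = t)]
      · by_cases htsub : t &&& i = t
        · by_cases hle : t ≤ (s - 1) &&& i
          · rw [if_pos (⟨hle, htsub⟩ : t ≤ (s - 1) &&& i ∧ t &&& i = t),
                if_pos (⟨by omega, htsub⟩ : t ≤ s ∧ t &&& i = t)]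
          · have hnot : ¬ t ≤ s := fun hts2 =>
              hle (le_pred_and s i t hs htsub (by omega))
            rw [if_neg (show ¬(t ≤ (s - 1) &&& i ∧ t &&& i = t) from fun h => hle h.1),
                if_neg (show ¬(s = t) from fun h => hts h.symm),
                if_neg (show ¬(t ≤ s ∧ t &&& i = t) from fun h => hnot h.1)]
        · rw [if_neg (show ¬(t ≤ (s - 1) &&& i ∧ t &&& i = t) from fun h => htsub h.2),
              if_neg (show ¬(s = t) from fun h => hts h.symm),
              if_neg (show ¬(t ≤ s ∧ t &&& i = t) from fun h => htsub h.2)]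

theorem altRow_eq (i : Nat) :
    altRow i = (List.range (i + 1)).map (fun k => if k &&& (i - k) == 0 then '*' else ' ') := by
  apply List.ext_getElem?
  intro t
  unfold altRow
  by_cases ht : t < i + 1
  · rw [fillStars_get i i (Nat.and_self i) _ t (by simp), List.getElem?_map,
        List.getElem?_range ht, List.getElem?_replicate, if_pos ht]
    have hiff := sub_iff i t (by omega)
    by_cases hsub : t &&& i = t
    · rw [if_pos ⟨by omega, hsub⟩]
      have hz : t &&& (i - t) = 0 := hiff.mpr hsub
      simp [hz]
    · rw [if_neg (fun h => hsub h.2)]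
      have hz : ¬(t &&& (i - t) = 0) := fun h => hsub (hiff.mp h)
      simp [hz]
  · have h1 : (fillStars i i (List.replicate (i + 1) ' ')).length ≤ t := by
      rw [fillStars_length, List.length_replicate]
      omega
    have h2 : (List.range (i + 1)).length ≤ t := by
      rw [List.length_range]
      omega
    rw [List.getElem?_map, List.getElem?_eq_none h1, List.getElem?_eq_none h2]
    rfl

theorem range_split (m : Nat) (hm : 1 ≤ m) :
    List.range m = List.range (m - 1) ++ [m - 1] := by
  conv_lhs => rw [show m = (m - 1) + 1 by omega, List.range_succ]

theorem chooseRow_get (i k : Nat) (hk : k < i + 1) :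
    PySem.List.pyGetD (chooseRow i) ((k : Nat) : Int) 0 = (Nat.choose i k : Int) := by
  rw [PySem.List.pyGetD_natCast]
  unfold chooseRow
  rw [PySem.List.getD_map_range _ _ _ _ hk]

-- one outer iteration sends the first m rows of Pascal's triangle to the first m+1
theorem pascalStep_eq (m : Nat) (hm : 1 ≤ m) :
    pascalStep ((List.range m).map chooseRow) (m : Int) = (List.range (m + 1)).map chooseRow := by
  have hlen : ((((List.range m).map chooseRow).length : Nat) : Int) = (m : Int) := by simp
  have hget : PySem.List.pyGetD ((List.range m).map chooseRow) ((m : Int) - 1) [] = chooseRow (m - 1) := by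
    have h1 : (m : Int) - 1 = ((m - 1 : Nat) : Int) := by omega
    rw [h1, PySem.List.pyGetD_natCast, PySem.List.getD_map_range _ _ _ _ (by omega)]
  unfold pascalStep
  simp only [hlen, hget, PySem.List.pyRange_zero_nat, List.foldl_map]
  rw [foldl_push_ite (List.range m) (fun j : Nat => ((j : Int) + 1 < (m : Int)))
        (fun j : Nat => PySem.List.pyGetD (chooseRow (m - 1)) ((j : Int)) 0 +
                        PySem.List.pyGetD (chooseRow (m - 1)) ((j : Int) + 1) 0)]
  have hfilt : (List.range m).filter (fun j : Nat => decide ((j : Int) + 1 < (m : Int)))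
      = List.range (m - 1) := by
    rw [range_split m hm, List.filter_append]
    have h1 : (List.range (m - 1)).filter (fun j : Nat => decide ((j : Int) + 1 < (m : Int)))
        = List.range (m - 1) := by
      apply List.filter_eq_self.mpr
      intro j hj
      simp only [List.mem_range] at hj
      simp only [decide_eq_true_eq]
      omega
    have h2 : ([m - 1].filter (fun j : Nat => decide ((j : Int) + 1 < (m : Int)))) = [] := by
      simp only [List.filter_cons, List.filter_nil, decide_eq_true_eq]
      rw [if_neg (by omega)]
    rw [h1, h2, List.append_nil]
  rw [hfilt]
  have hmap : (List.range (m - 1)).map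
      (fun j : Nat => PySem.List.pyGetD (chooseRow (m - 1)) ((j : Int)) 0 +
                      PySem.List.pyGetD (chooseRow (m - 1)) ((j : Int) + 1) 0)
      = (List.range (m - 1)).map (fun j : Nat => (Nat.choose m (j + 1) : Int)) := by
    apply List.map_congr_left
    intro j hj
    simp only [List.mem_range] at hj
    have e2 : ((j : Int) + 1) = (((j + 1 : Nat)) : Int) := by push_cast; ring
    rw [e2, chooseRow_get (m - 1) j (by omega), chooseRow_get (m - 1) (j + 1) (by omega)]
    have hc : Nat.choose m (j + 1) = Nat.choose (m - 1) j + Nat.choose (m - 1) (j + 1) := by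
      conv_lhs => rw [show m = (m - 1) + 1 by omega]
      exact Nat.choose_succ_succ _ _
    rw [hc]
    push_cast
    ring
  rw [hmap]
  have hrow : chooseRow m
      = [(1 : Int)] ++ (List.range (m - 1)).map (fun j : Nat => (Nat.choose m (j + 1) : Int)) ++ [(1 : Int)] := by
    unfold chooseRow
    rw [List.range_succ_eq_map, List.map_cons, List.map_map]
    rw [range_split m hm, List.map_append]
    have hl : ([m - 1].map ((fun k : Nat => (Nat.choose m k : Int)) ∘ Nat.succ)) = [(1 : Int)] := by
      simp only [List.map_cons, List.map_nil, Function.comp]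
      rw [show (m - 1).succ = m by omega, Nat.choose_self]
      norm_num
    rw [hl]
    simp [Function.comp, Nat.choose_zero_right, Nat.succ_eq_add_one]
  rw [List.range_succ, List.map_append, List.map_cons, List.map_nil, hrow]

-- the whole triangle A builds: one row per outer iteration, one row if the loop never runs
theorem pascal_aux (m : Nat) :
    (PySem.List.pyRange 1 ((m + 1 : Nat) : Int) 1).foldl pascalStep [[(1 : Int)]]
      = (List.range (m + 1)).map chooseRow := by
  induction m with
  | zero =>
      rw [PySem.List.pyRange_one_eq_nil (by norm_num)]
      simp [chooseRow]
  | succ m ih =>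
      have hc : ((m + 2 : Nat) : Int) = ((m + 1 : Nat) : Int) + 1 := by push_cast; ring
      rw [hc, PySem.List.pyRange_one_succ_right (by push_cast; omega), List.foldl_append, ih]
      simp only [List.foldl_cons, List.foldl_nil]
      exact pascalStep_eq (m + 1) (by omega)

theorem pascal_eq (n : Int) :
    (PySem.List.pyRange 1 n 1).foldl pascalStep [[(1 : Int)]]
      = (List.range (if n > 1 then n.toNat else 1)).map chooseRow := by
  by_cases hn : n > 1
  · rw [if_pos hn]
    obtain ⟨m, hm⟩ : ∃ m, n.toNat = m + 1 := ⟨n.toNat - 1, by omega⟩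
    rw [hm, ← show ((m + 1 : Nat) : Int) = n from by omega, pascal_aux]
  · rw [if_neg hn, PySem.List.pyRange_one_eq_nil (by omega)]
    simp [chooseRow]

-- A's character for entry C(i,k) equals B's bit-test character
theorem cell_eq (i k : Nat) (hk : k ≤ i) :
    (if PySem.Int.mod ((Nat.choose i k : Nat) : Int) 2 == 0 then ' ' else '*')
      = (if k &&& (i - k) == 0 then '*' else ' ') := by
  have hmod : PySem.Int.mod ((Nat.choose i k : Nat) : Int) 2 = ((Nat.choose i k % 2 : Nat) : Int) := by
    rw [PySem.Int.mod_eq_emod_of_pos (by norm_num)]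
    push_cast
    rfl
  have hand : k &&& (i - k) = (i - k) &&& k := Nat.land_comm k (i - k)
  by_cases hodd : Nat.choose i k % 2 = 1
  · have hbit : (i - k) &&& k = 0 := (choose_odd_iff i k hk).mp hodd
    rw [hmod, hodd]
    simp [hand, hbit]
  · have h0 : Nat.choose i k % 2 = 0 := by omega
    have hbit : ¬((i - k) &&& k = 0) := fun h => hodd ((choose_odd_iff i k hk).mpr h)
    rw [hmod, h0]
    simp [hand, hbit]

theorem row_eq (i : Nat) :
    (chooseRow i).map (fun e => if PySem.Int.mod e 2 == 0 then ' ' else '*') = altRow i := by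
  rw [altRow_eq]
  unfold chooseRow
  rw [List.map_map]
  apply List.map_congr_left
  intro k hk
  simp only [List.mem_range] at hk
  exact cell_eq i k (by omega)

theorem join_newline (ls : List (List Char)) (h : ls ≠ []) :
    PySem.Chars.join ['\n'] ls ++ ['\n'] = (ls.map (fun l => l ++ ['\n'])).flatten := by
  induction ls with
  | nil => exact absurd rfl h
  | cons x t ih =>
      cases t with
      | nil => simp [PySem.Chars.join_singleton]
      | cons y t' =>
          rw [List.map_cons, List.flatten_cons, ← ih (by simp), PySem.Chars.join_cons_cons]
          simp [List.append_assoc]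

-- ===== VERDICT (by name: the statement is the Claim_ definition above) =====
theorem sarpenski_carpet_spec : Claim_equal_sarpenski_carpet := by
  intro n _
  unfold Spec_sarpenski_carpet sarpenski_carpet sarpenski_carpet_alt
  rw [pascal_eq]
  have hfun : (fun (acc : List Char) (l : List Int) =>
      (l.foldl (fun acc e => if PySem.Int.mod e 2 == 0 then acc ++ [' '] else acc ++ ['*']) acc) ++ ['\n'])
      = fun acc l => acc ++ (l.map (fun e => if PySem.Int.mod e 2 == 0 then ' ' else '*') ++ ['\n']) := by
    funext acc l
    rw [inner_push, List.append_assoc]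
  rw [hfun, foldl_append_flatten _
        (fun l : List Int => l.map (fun e => if PySem.Int.mod e 2 == 0 then ' ' else '*') ++ ['\n']),
      List.nil_append]
  have hne : (List.range (if n > 1 then n.toNat else 1)).map altRow ≠ [] := by
    split
    · simp_all
      omega
    · simp
  rw [join_newline _ hne, List.map_map, List.map_map]
  refine congrArg String.ofList (congrArg List.flatten ?_)
  apply List.map_congr_left
  intro i _
  simp only [Function.comp]
  rw [row_eq]
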